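-- pv_equiv track=rewrite | github.com/psmoros/AutomatedInference | Model.py | compute_preferred_extensions
-- ===== SOURCE A (Python) =====
-- def compute_preferred_extensions(adm):
--
--     pref = []
--     maxLen = 0
--
--     for i in adm:
--         if len(i)>maxLen:
--             maxLen = len(i)
--
--     for i in adm:
--         if len(i)==maxLen:
--             pref.append(i)
--
--     return set(pref)
-- ===== SOURCE B (Python) =====
-- def compute_preferred_extensions(adm):
--     maxLen = -1
--     best = []
--     for i in adm:
--         l = len(i)
--         if l > maxLen:
--             maxLen = l
--             best = [i]
--         elif l == maxLen:
--             best.append(i)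
--     return set(best)
-- ===== Notes on version B (the rewrite author's own statement) =====
-- stated objective: alternative
-- what changed: Replaced A's two passes (one to compute the maximum length, one to refilter) by a single pass threading the running maximum and the current list of maximal items, resetting the list whenever a longer item appears.
import Mathlib
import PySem

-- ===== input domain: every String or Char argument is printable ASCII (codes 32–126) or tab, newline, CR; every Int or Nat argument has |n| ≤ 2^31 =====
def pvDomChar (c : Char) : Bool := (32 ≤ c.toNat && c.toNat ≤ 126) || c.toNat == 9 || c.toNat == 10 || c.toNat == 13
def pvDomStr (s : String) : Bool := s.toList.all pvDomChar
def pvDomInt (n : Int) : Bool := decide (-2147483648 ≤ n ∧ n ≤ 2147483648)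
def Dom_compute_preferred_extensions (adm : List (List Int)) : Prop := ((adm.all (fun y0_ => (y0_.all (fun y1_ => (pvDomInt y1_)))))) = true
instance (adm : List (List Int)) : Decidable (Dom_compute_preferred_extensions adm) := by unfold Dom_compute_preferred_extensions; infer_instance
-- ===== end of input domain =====

-- B replaces A's two passes (max, then refilter) by one pass carrying the running max and the current maximal items; same cost, different decomposition.

-- ===== PORT A =====
def compute_preferred_extensions (adm : List (List Int)) : List (List Int) :=
  -- first loop: maxLen
  let maxLen : Int := adm.foldl (fun m i => if (i.length : Int) > m then (i.length : Int) else m) 0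
  -- second loop: pref.append(i) when len(i)==maxLen
  let pref : List (List Int) := adm.foldl (fun p i => if (i.length : Int) = maxLen then p ++ [i] else p) []
  PySem.Set.ofList pref

-- ===== PORT B =====
def compute_preferred_extensions_alt (adm : List (List Int)) : List (List Int) :=
  -- single loop over adm carrying (maxLen, best)
  let st : Int × List (List Int) := adm.foldl
    (fun st i =>
      let l : Int := i.length
      if l > st.1 then (l, [i])
      else if l = st.1 then (st.1, st.2 ++ [i])
      else st)
    ((-1 : Int), [])
  PySem.Set.ofList st.2

-- ===== PRECONDITION & SPEC =====
def Spec_compute_preferred_extensions (adm : List (List Int)) (out : List (List Int)) : Prop := out = compute_preferred_extensions_alt adm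
instance (adm : List (List Int)) (out : List (List Int)) : Decidable (Spec_compute_preferred_extensions adm out) := by unfold Spec_compute_preferred_extensions; infer_instance

-- ===== CLAIM (what is proved, stated in full; the proofs are below) =====
def Claim_equal_compute_preferred_extensions : Prop := ∀ (adm : List (List Int)), Dom_compute_preferred_extensions adm → Spec_compute_preferred_extensions adm (compute_preferred_extensions adm)

-- ===== LEMMAS AND PROOFS =====

-- A's first loop (the running maximum), from an arbitrary starting value
def pvGmax (adm : List (List Int)) (m : Int) : Int :=
  adm.foldl (fun a i => if (i.length : Int) > a then (i.length : Int) else a) m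

theorem pvGmax_cons (i : List Int) (rest : List (List Int)) (m : Int) :
    pvGmax (i :: rest) m = pvGmax rest (if (i.length : Int) > m then (i.length : Int) else m) := rfl

theorem le_pvGmax : ∀ (adm : List (List Int)) (m : Int), m ≤ pvGmax adm m := by
  intro adm
  induction adm with
  | nil => intro m; simp [pvGmax]
  | cons i rest ih =>
    intro m
    rw [pvGmax_cons]
    have h := ih (if (i.length : Int) > m then (i.length : Int) else m)
    split_ifs at h ⊢ <;> omega

-- characterisation of B's single loop from an arbitrary state
theorem alt_fold_char : ∀ (adm : List (List Int)) (m : Int) (b : List (List Int)),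
    adm.foldl
      (fun st i =>
        let l : Int := i.length
        if l > st.1 then (l, [i])
        else if l = st.1 then (st.1, st.2 ++ [i])
        else st)
      (m, b)
    = (pvGmax adm m,
       (if pvGmax adm m = m then b else []) ++ adm.filter (fun i => (i.length : Int) = pvGmax adm m)) := by
  intro adm
  induction adm with
  | nil => intro m b; simp [pvGmax]
  | cons i rest ih =>
    intro m b
    rw [List.foldl_cons]
    by_cases h1 : (i.length : Int) > m
    · have hstep : (let l : Int := i.length
          if l > ((m, b) : Int × List (List Int)).1 then (l, [i])
          else if l = ((m, b) : Int × List (List Int)).1 then (((m, b) : Int × List (List Int)).1, ((m, b) : Int × List (List Int)).2 ++ [i])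
          else ((m, b) : Int × List (List Int))) = ((i.length : Int), [i]) := by simp [h1]
      have hm : (if (i.length : Int) > m then (i.length : Int) else m) = (i.length : Int) := if_pos h1
      rw [hstep, ih, pvGmax_cons, hm]
      have hle := le_pvGmax rest (i.length : Int)
      have hne : pvGmax rest (i.length : Int) ≠ m := by omega
      rw [if_neg hne, List.filter_cons]
      by_cases h2 : pvGmax rest (i.length : Int) = (i.length : Int)
      · simp [h2]
      · have hi : ¬ ((i.length : Int) = pvGmax rest (i.length : Int)) := fun h => h2 h.symm
        simp [h2, hi]
    · have hm : (if (i.length : Int) > m then (i.length : Int) else m) = m := if_neg h1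
      rw [pvGmax_cons, hm]
      have hle := le_pvGmax rest m
      by_cases h2 : (i.length : Int) = m
      · have hstep : (let l : Int := i.length
            if l > ((m, b) : Int × List (List Int)).1 then (l, [i])
            else if l = ((m, b) : Int × List (List Int)).1 then (((m, b) : Int × List (List Int)).1, ((m, b) : Int × List (List Int)).2 ++ [i])
            else ((m, b) : Int × List (List Int))) = (m, b ++ [i]) := by simp [h2]
        rw [hstep, ih, List.filter_cons]
        by_cases h3 : pvGmax rest m = m
        · have hi : ((i.length : Int) = pvGmax rest m) := by omega
          simp [h3, hi, List.append_assoc]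
        · have hi : ¬ ((i.length : Int) = pvGmax rest m) := by omega
          simp [h3, hi]
      · have hstep : (let l : Int := i.length
            if l > ((m, b) : Int × List (List Int)).1 then (l, [i])
            else if l = ((m, b) : Int × List (List Int)).1 then (((m, b) : Int × List (List Int)).1, ((m, b) : Int × List (List Int)).2 ++ [i])
            else ((m, b) : Int × List (List Int))) = (m, b) := by simp [h1, h2]
        rw [hstep, ih, List.filter_cons]
        have hi : ¬ ((i.length : Int) = pvGmax rest m) := by omega
        simp [hi]

-- A's second loop is a filter
theorem a_pref_filter (adm : List (List Int)) (M : Int) :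
    adm.foldl (fun p i => if (i.length : Int) = M then p ++ [i] else p) []
      = adm.filter (fun i => (i.length : Int) = M) := by
  induction adm using List.reverseRecOn with
  | nil => simp
  | append_singleton rest i ih =>
    rw [List.foldl_append, List.foldl_cons, List.foldl_nil, List.filter_append, ih]
    by_cases h : (i.length : Int) = M <;> simp [h]

-- for nonempty adm, starting the running maximum at -1 or at 0 gives the same result
theorem pvGmax_neg_one (i : List Int) (rest : List (List Int)) :
    pvGmax (i :: rest) (-1) = pvGmax (i :: rest) 0 := by
  rw [pvGmax_cons, pvGmax_cons]
  have h0 : (0 : Int) ≤ (i.length : Int) := Int.natCast_nonneg _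
  have he : (if (i.length : Int) > -1 then (i.length : Int) else (-1 : Int))
      = (if (i.length : Int) > 0 then (i.length : Int) else (0 : Int)) := by
    split_ifs <;> omega
  rw [he]

-- ===== VERDICT (by name: the statement is the Claim_ definition above) =====
theorem compute_preferred_extensions_spec : Claim_equal_compute_preferred_extensions := by
  intro adm _
  show PySem.Set.ofList
      (adm.foldl (fun p i => if (i.length : Int) = pvGmax adm 0 then p ++ [i] else p) [])
    = PySem.Set.ofList
      (adm.foldl
        (fun (st : Int × List (List Int)) i =>
          let l : Int := i.length
          if l > st.1 then (l, [i])
          else if l = st.1 then (st.1, st.2 ++ [i])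
          else st)
        ((-1 : Int), [])).2
  rw [a_pref_filter, alt_fold_char]
  cases adm with
  | nil => rfl
  | cons i rest =>
    have hG : pvGmax (i :: rest) (-1) = pvGmax (i :: rest) 0 := pvGmax_neg_one i rest
    have hge : (0 : Int) ≤ pvGmax (i :: rest) 0 := le_pvGmax (i :: rest) 0
    have hne : pvGmax (i :: rest) (-1) ≠ -1 := by omega
    rw [hG, if_neg (hG ▸ hne), List.nil_append]
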